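-- pv_equiv track=rewrite | github.com/MrBrantCode/unitest_baseline | mut_generate/mist_train_cf/cf_84321/solution.py | count_polysyllabic_words
-- ===== SOURCE A (Python) =====
-- def count_polysyllabic_words(input_string):
--     vowels = set("aeiouy")
--     input_string = input_string.lower()
--     words = input_string.split()
--     polysyllabic_words = []
--     count = 0
--
--     for word in words:
--         if vowels.issubset(word):
--             syllables = sum(word[i] in vowels and word[i - 1] not in vowels for i in range(1, len(word)))
--             if syllables > 1:
--                 polysyllabic_words.append(word)
--                 count += 1
--
--     return count, polysyllabic_words
-- ===== SOURCE B (Python) =====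
-- def count_polysyllabic_words(input_string):
--     # single-pass streaming automaton: no split(), no per-word rescans;
--     # tracks the current word's seen-vowel set and consonant->vowel
--     # transition count incrementally, finalizing at each whitespace boundary
--     vowels = frozenset("aeiouy")
--     result = []
--     cur = []
--     seen = set()
--     trans = 0
--     prev = None
--     for c in input_string.lower() + " ":
--         if c.isspace():
--             if cur and vowels.issubset(seen) and trans > 1:
--                 result.append("".join(cur))
--             cur = []
--             seen = set()
--             trans = 0
--             prev = None
--         else:
--             cur.append(c)
--             if c in vowels:
--                 seen.add(c)
--                 if prev is not None and prev not in vowels: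
--                     trans += 1
--             prev = c
--     return len(result), result
-- ===== Notes on version B (the rewrite author's own statement) =====
-- stated objective: alternative
-- what changed: A lowercases, splits into words and rescans each word twice (issubset over the word, then an index comprehension over all positions); B never calls split(): it is a single streaming pass over the characters that builds each word, its seen-vowel set and its consonant-to-vowel transition count incrementally and finalizes the word at each whitespace boundary.
import Mathlib
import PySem

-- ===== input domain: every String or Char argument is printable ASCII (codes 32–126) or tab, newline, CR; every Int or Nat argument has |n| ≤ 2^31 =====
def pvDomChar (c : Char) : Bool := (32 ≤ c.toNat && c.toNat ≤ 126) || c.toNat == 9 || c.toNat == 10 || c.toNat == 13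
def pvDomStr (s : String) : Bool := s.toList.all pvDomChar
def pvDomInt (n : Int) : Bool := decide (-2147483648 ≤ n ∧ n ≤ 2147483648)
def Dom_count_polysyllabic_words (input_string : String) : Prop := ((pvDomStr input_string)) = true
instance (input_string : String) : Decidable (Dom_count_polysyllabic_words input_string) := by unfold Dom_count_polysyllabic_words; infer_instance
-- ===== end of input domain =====

-- B replaces A's split-then-rescan-each-word structure by a single streaming pass over the
-- characters that tracks each word's seen-vowel set and transition count incrementally (objective: alternative).

-- ===== PORT A =====
def pvVowels : List Char := PySem.Set.ofList "aeiouy".toList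

-- word[i] / word[i-1] for i in range(1, len(word)): both indices are always in range,
-- so pyGetD with a default is exact here.
def syllA (cs : List Char) : Int :=
  (PySem.List.pyRange 1 (cs.length : Int) 1).foldl
    (fun t i =>
      t + (if PySem.List.pyGetD cs i ' ' ∈ pvVowels ∧ PySem.List.pyGetD cs (i - 1) ' ' ∉ pvVowels then 1 else 0)) 0

def count_polysyllabic_words (input_string : String) : Int × List String :=
  let s := PySem.Str.lower input_string
  let words := PySem.Str.split₀ s
  words.foldl
    (fun (acc : Int × List String) word =>
      if PySem.Set.issubset pvVowels word.toList then
        if syllA word.toList > 1 then (acc.1 + 1, acc.2 ++ [word]) else acc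
      else acc) (0, [])

-- ===== PORT B =====
-- B's for loop over the character stream (the final " " sentinel included), carried
-- state (result, cur, seen, trans, prev) exactly as in Source B.
-- the "prev is not None and prev not in vowels" test of Source B
def prevConsonant (pv : Option Char) : Bool :=
  match pv with
  | some p => decide (p ∉ pvVowels)
  | none => false

def loopB : List Char → List String → List Char → PySem.Set Char → Int → Option Char → List String
  | [], res, _cur, _seen, _tr, _pv => res
  | c :: rest, res, cur, seen, tr, pv =>
    if PySem.Chars.isspace c then
      loopB rest
        (if cur ≠ [] ∧ PySem.Set.issubset pvVowels seen ∧ tr > 1 then res ++ [String.ofList cur] else res)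
        [] PySem.Set.empty 0 none
    else
      let cur' := cur ++ [c]
      if c ∈ pvVowels then
        let seen' := PySem.Set.add seen c
        let tr' := if prevConsonant pv then tr + 1 else tr
        loopB rest res cur' seen' tr' (some c)
      else
        loopB rest res cur' seen tr (some c)

def count_polysyllabic_words_alt (input_string : String) : Int × List String :=
  let res := loopB ((PySem.Str.lower input_string).toList ++ [' ']) [] [] PySem.Set.empty 0 none
  ((res.length : Int), res)

-- ===== PRECONDITION & SPEC =====
def Spec_count_polysyllabic_words (input_string : String) (out : Int × List String) : Prop := out = count_polysyllabic_words_alt input_string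
instance (input_string : String) (out : Int × List String) : Decidable (Spec_count_polysyllabic_words input_string out) := by unfold Spec_count_polysyllabic_words; infer_instance

-- ===== CLAIM (what is proved, stated in full; the proofs are below) =====
def Claim_equal_count_polysyllabic_words : Prop := ∀ (input_string : String), Dom_count_polysyllabic_words input_string → Spec_count_polysyllabic_words input_string (count_polysyllabic_words input_string)

-- ===== LEMMAS AND PROOFS =====

-- A's transition count, restated structurally on the character list.
def ctr : List Char → Nat
  | c1 :: c2 :: rest => (if c2 ∈ pvVowels ∧ c1 ∉ pvVowels then 1 else 0) + ctr (c2 :: rest)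
  | _ => 0

-- the per-word gate both programs implement
def qWord (w : List Char) : Bool := PySem.Set.issubset pvVowels w && decide (ctr w > 1)

theorem zip_range_pairs (cs : List Char) (d : Char) (f : Char → Char → Int) :
    (PySem.List.pyRange 1 (cs.length : Int) 1).map
        (fun i => f (PySem.List.pyGetD cs (i - 1) d) (PySem.List.pyGetD cs i d))
      = List.zipWith f cs cs.tail := by
  apply List.ext_getElem
  · simp only [List.length_map, PySem.List.length_pyRange_one, List.length_zipWith, List.length_tail]
    omega
  · intro k h1 h2
    simp only [List.getElem_map, PySem.List.getElem_pyRange_one]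
    have hk : k + 1 < cs.length := by
      simp [PySem.List.length_pyRange_one] at h1; omega
    have e1 : (1 : Int) + k - 1 = ((k : Nat) : Int) := by omega
    have e2 : (1 : Int) + k = (((k + 1 : Nat)) : Int) := by push_cast; ring
    rw [e1, e2, PySem.List.pyGetD_natCast, PySem.List.pyGetD_natCast]
    rw [List.getElem_zipWith]
    rw [List.getD_eq_getElem _ _ (by omega), List.getD_eq_getElem _ _ hk]
    congr 1
    · exact (List.getElem_tail ..).symm

theorem sum_zip_eq_ctr (cs : List Char) :
    (List.zipWith (fun p c => if c ∈ pvVowels ∧ p ∉ pvVowels then (1 : Int) else 0) cs cs.tail).sum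
      = (ctr cs : Int) := by
  induction cs with
  | nil => simp [ctr]
  | cons c1 t ih =>
    cases t with
    | nil => simp [ctr]
    | cons c2 rest =>
      simp only [List.tail_cons] at ih ⊢
      simp only [List.zipWith_cons_cons, List.sum_cons, ih, ctr]
      push_cast
      split_ifs <;> ring

theorem syllA_eq_ctr (cs : List Char) : syllA cs = (ctr cs : Int) := by
  unfold syllA
  rw [PySem.List.foldl_add (g := fun i => if PySem.List.pyGetD cs i ' ' ∈ pvVowels ∧ PySem.List.pyGetD cs (i - 1) ' ' ∉ pvVowels then (1:Int) else 0)]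
  rw [zip_range_pairs cs ' ' (fun p c => if c ∈ pvVowels ∧ p ∉ pvVowels then (1:Int) else 0)]
  rw [sum_zip_eq_ctr]
  ring

theorem ctr_snoc (w : List Char) (c : Char) :
    ctr (w ++ [c])
      = ctr w + (match w.getLast? with
                 | some p => if c ∈ pvVowels ∧ p ∉ pvVowels then 1 else 0
                 | none => 0) := by
  induction w with
  | nil => simp [ctr]
  | cons a t ih =>
    cases t with
    | nil => simp [ctr]
    | cons b r =>
      rw [List.cons_append] at ih
      show ctr (a :: b :: (r ++ [c])) = _
      rw [ctr, ih, ctr]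
      simp only [List.getLast?_cons_cons]
      omega

theorem pair_fold (l : List String) (p : String → Bool) (c : Int) (ws : List String) :
    l.foldl (fun (acc : Int × List String) w => if p w then (acc.1 + 1, acc.2 ++ [w]) else acc) (c, ws)
      = (c + ((l.filter p).length : Int), ws ++ l.filter p) := by
  induction l generalizing c ws with
  | nil => simp
  | cons w t ih =>
    by_cases h : p w
    · simp [h, ih]
      omega
    · simp [h, ih]

theorem go_acc (s : List Char) (cur : List Char) (acc : List (List Char)) :
    PySem.Chars.split₀.go s cur acc = acc.reverse ++ PySem.Chars.split₀.go s cur [] := by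
  induction s generalizing cur acc with
  | nil =>
    rw [PySem.Chars.split₀.go, PySem.Chars.split₀.go]
    by_cases h : cur.isEmpty <;> simp [h]
  | cons c rest ih =>
    rw [PySem.Chars.split₀.go, PySem.Chars.split₀.go]
    by_cases hs : PySem.Chars.isspace c = true
    · rw [if_pos hs, if_pos hs]
      by_cases h : cur.isEmpty = true
      · rw [if_pos h, if_pos h]
        exact ih [] acc
      · rw [if_neg h, if_neg h]
        rw [ih [] (cur.reverse :: acc), ih [] [cur.reverse]]
        simp
    · rw [if_neg hs, if_neg hs]
      exact ih (c :: cur) acc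

theorem gate_iff (cur : List Char) (seen : PySem.Set Char) (tr : Int)
    (hseen : ∀ v ∈ pvVowels, (v ∈ seen ↔ v ∈ cur))
    (htr : tr = (ctr cur : Int)) :
    (cur ≠ [] ∧ PySem.Set.issubset pvVowels seen = true ∧ tr > 1)
      ↔ (cur ≠ [] ∧ qWord cur = true) := by
  have hsub : PySem.Set.issubset pvVowels seen = PySem.Set.issubset pvVowels cur := by
    rw [Bool.eq_iff_iff, PySem.Set.issubset_iff, PySem.Set.issubset_iff]
    constructor
    · intro h v hv; exact (hseen v hv).1 (h v hv)
    · intro h v hv; exact (hseen v hv).2 (h v hv)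
  unfold qWord
  rw [hsub, htr]
  simp only [Bool.and_eq_true, decide_eq_true_eq, gt_iff_lt]
  constructor
  · rintro ⟨h1, h2, h3⟩; exact ⟨h1, h2, by exact_mod_cast h3⟩
  · rintro ⟨h1, h2, h3⟩; exact ⟨h1, h2, by exact_mod_cast h3⟩

theorem loopB_spec (s : List Char) (res : List String) (cur : List Char)
    (seen : PySem.Set Char) (tr : Int)
    (hseen : ∀ v ∈ pvVowels, (v ∈ seen ↔ v ∈ cur))
    (htr : tr = (ctr cur : Int)) :
    loopB (s ++ [' ']) res cur seen tr cur.getLast?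
      = res ++ ((PySem.Chars.split₀.go s cur.reverse []).filter qWord).map String.ofList := by
  induction s generalizing res cur seen tr with
  | nil =>
    show loopB [' '] res cur seen tr cur.getLast? = _
    rw [loopB]
    rw [if_pos (by decide)]
    rw [loopB]
    rw [PySem.Chars.split₀.go]
    by_cases hc : cur = []
    · subst hc
      simp
    · have hne : ¬ (cur.reverse.isEmpty = true) := by
        simp [List.isEmpty_iff, hc]
      rw [if_neg hne]
      by_cases hq : qWord cur = true
      · rw [if_pos ((gate_iff cur seen tr hseen htr).mpr ⟨hc, hq⟩)]
        simp [hq]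
      · rw [if_neg (fun h => hq ((gate_iff cur seen tr hseen htr).mp h).2)]
        simp [hq]
  | cons c rest ih =>
    show loopB (c :: (rest ++ [' '])) res cur seen tr cur.getLast? = _
    rw [loopB, PySem.Chars.split₀.go]
    by_cases hs : PySem.Chars.isspace c = true
    · -- whitespace: finalize cur, reset state
      rw [if_pos hs, if_pos hs]
      have hrec := ih (res := (if cur ≠ [] ∧ PySem.Set.issubset pvVowels seen ∧ tr > 1 then res ++ [String.ofList cur] else res))
        (cur := []) (seen := PySem.Set.empty) (tr := 0)
        (by intro v _; simp [PySem.Set.empty]) (by simp [ctr])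
      simp only [List.getLast?_nil, List.reverse_nil] at hrec
      rw [hrec]
      by_cases hc : cur = []
      · subst hc
        simp
      · have hne : ¬ (cur.reverse.isEmpty = true) := by
          simp [List.isEmpty_iff, hc]
        rw [if_neg hne]
        rw [go_acc rest [] [cur.reverse.reverse]]
        simp only [List.reverse_reverse, List.reverse_cons, List.reverse_nil, List.nil_append]
        rw [List.filter_append, List.map_append, ← List.append_assoc]
        by_cases hq : qWord cur = true
        · rw [if_pos ((gate_iff cur seen tr hseen htr).mpr ⟨hc, hq⟩)]
          simp [hq]
        · rw [if_neg (fun h => hq ((gate_iff cur seen tr hseen htr).mp h).2)]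
          simp [hq]
    · -- word character: extend cur, update seen/tr incrementally
      rw [if_neg hs, if_neg hs]
      have hctr := ctr_snoc cur c
      have hrev : (cur ++ [c]).reverse = c :: cur.reverse := by simp
      by_cases hcv : c ∈ pvVowels
      · simp only [hcv, if_true]
        have hrec := ih (res := res) (cur := cur ++ [c]) (seen := PySem.Set.add seen c)
          (tr := if prevConsonant cur.getLast? then tr + 1 else tr)
          (by
            intro v hv
            rw [PySem.Set.mem_add]
            constructor
            · rintro (h | h)
              · exact List.mem_append_left _ ((hseen v hv).1 h)
              · subst h; simp
            · intro h
              rcases List.mem_append.1 h with h | h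
              · exact Or.inl ((hseen v hv).2 h)
              · simp at h; exact Or.inr h)
          (by
            rw [hctr, htr]
            cases hl : cur.getLast? with
            | none => simp [prevConsonant]
            | some p =>
              by_cases hp : p ∈ pvVowels
              · simp [prevConsonant, hp, hcv]
              · simp [prevConsonant, hp, hcv])
        rw [List.getLast?_concat] at hrec
        rw [hrec, hrev]
      · simp only [hcv, if_false]
        have hrec := ih (res := res) (cur := cur ++ [c]) (seen := seen) (tr := tr)
          (by
            intro v hv
            rw [hseen v hv]
            constructor
            · exact fun h => List.mem_append_left _ h
            · intro h
              rcases List.mem_append.1 h with h | h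
              · exact h
              · simp at h; subst h; exact absurd hv hcv)
          (by
            rw [hctr, htr]
            cases hl : cur.getLast? with
            | none => simp
            | some p => simp [hcv])
        rw [List.getLast?_concat] at hrec
        rw [hrec, hrev]

theorem main_eq (input_string : String) :
    count_polysyllabic_words input_string = count_polysyllabic_words_alt input_string := by
  unfold count_polysyllabic_words count_polysyllabic_words_alt
  have hB := loopB_spec (PySem.Str.lower input_string).toList [] [] PySem.Set.empty 0
    (by intro v _; simp [PySem.Set.empty]) (by simp [ctr])
  simp only [List.getLast?_nil, List.reverse_nil, List.nil_append] at hB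
  rw [hB]
  -- A's fold as a filter
  have hbodyA : (PySem.Str.split₀ (PySem.Str.lower input_string)).foldl
      (fun (acc : Int × List String) word =>
        if PySem.Set.issubset pvVowels word.toList then
          if syllA word.toList > 1 then (acc.1 + 1, acc.2 ++ [word]) else acc
        else acc) (0, [])
      = (PySem.Str.split₀ (PySem.Str.lower input_string)).foldl
          (fun (acc : Int × List String) word =>
            if qWord word.toList then (acc.1 + 1, acc.2 ++ [word]) else acc) (0, []) := by
    apply PySem.List.foldl_congr_mem
    intro acc w _
    unfold qWord
    rw [syllA_eq_ctr]
    by_cases hg : PySem.Set.issubset pvVowels w.toList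
    · simp only [hg, if_pos, Bool.true_and, gt_iff_lt]
      by_cases hsv : (1 : Int) < (ctr w.toList : Int)
      · rw [if_pos hsv, if_pos (by simp; exact_mod_cast hsv)]
      · rw [if_neg hsv, if_neg (by simp; omega)]
    · simp [hg]
  rw [hbodyA, pair_fold]
  -- B's word list equals A's filtered split
  have hwords : ((PySem.Chars.split₀ (PySem.Str.lower input_string).toList).filter qWord).map String.ofList
      = (PySem.Str.split₀ (PySem.Str.lower input_string)).filter (fun w => qWord w.toList) := by
    rw [← PySem.Str.split₀_map_toList]
    rw [List.filter_map, List.map_map]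
    have hid : (String.ofList ∘ String.toList) = id := by
      funext w; simp
    rw [hid, List.map_id]
    rfl
  have hgo : PySem.Chars.split₀.go (PySem.Str.lower input_string).toList [] []
      = PySem.Chars.split₀ (PySem.Str.lower input_string).toList := rfl
  rw [hgo, hwords]
  simp

-- ===== VERDICT (by name: the statement is the Claim_ definition above) =====
theorem count_polysyllabic_words_spec : Claim_equal_count_polysyllabic_words := by
  intro input_string _
  unfold Spec_count_polysyllabic_words
  exact main_eq input_string
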